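-- pv_equiv track=rewrite | github.com/gnawre31/CCPS109-109-Python-Problems | labs109.py | words_with_letters
-- ===== SOURCE A (Python) =====
-- def words_with_letters(words, letters):
--     ans = []
--     for word in words:
--         i = 0
--         j = 0
--         while i < len(letters) and j < len(word):
--             if letters[i] == word[j]:
--                 i += 1
--             j += 1
--         if i == len(letters): ans.append(word)
--     return ans
-- ===== SOURCE B (Python) =====
-- def words_with_letters(words, letters):
--     def is_sub(word):
--         # index: char -> ascending list of its positions in word
--         pos = {}
--         for idx, ch in enumerate(word):
--             pos.setdefault(ch, []).append(idx)
--         cur = -1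
--         for c in letters:
--             lst = pos.get(c, [])
--             # binary search: first position in lst strictly greater than cur
--             lo, hi = 0, len(lst)
--             while lo < hi:
--                 mid = (lo + hi) // 2
--                 if lst[mid] <= cur:
--                     lo = mid + 1
--                 else:
--                     hi = mid
--             if lo == len(lst):
--                 return False
--             cur = lst[lo]
--         return True
--     return [word for word in words if is_sub(word)]
-- ===== Notes on version B (the rewrite author's own statement) =====
-- stated objective: alternative
-- what changed: Instead of A's two-pointer scan of each word, B builds a per-word char-to-positions index once and then walks only the letters, jumping to the next usable position with a hand-written binary search over the sorted position list.
import Mathlib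
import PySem

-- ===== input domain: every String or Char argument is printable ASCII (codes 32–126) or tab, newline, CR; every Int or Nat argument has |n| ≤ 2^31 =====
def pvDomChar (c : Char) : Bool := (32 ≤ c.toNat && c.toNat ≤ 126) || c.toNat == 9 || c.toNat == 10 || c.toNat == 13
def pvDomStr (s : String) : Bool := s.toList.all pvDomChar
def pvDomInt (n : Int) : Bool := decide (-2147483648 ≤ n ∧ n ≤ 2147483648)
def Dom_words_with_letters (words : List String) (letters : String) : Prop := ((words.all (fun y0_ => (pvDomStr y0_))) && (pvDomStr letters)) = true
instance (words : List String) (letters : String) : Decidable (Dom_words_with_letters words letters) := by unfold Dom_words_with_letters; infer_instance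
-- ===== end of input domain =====

-- B replaces A's two-pointer scan of each word by a per-word char→positions index
-- queried with a hand-written binary search (alternative algorithm, same results).

-- ===== PORT A =====
-- inner while loop of A: i indexes letters, j walks word; returns final i
def wwlLoopA (letters : List Char) (i : Nat) : List Char → Nat
  | [] => i
  | c :: rest =>
    if i < letters.length then
      if letters.getD i ' ' == c then wwlLoopA letters (i+1) rest
      else wwlLoopA letters i rest
    else i

def words_with_letters (words : List String) (letters : String) : List String :=
  words.foldl (fun ans word =>
    if wwlLoopA letters.toList 0 word.toList = letters.toList.length then ans ++ [word]
    else ans) []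

-- ===== PORT B =====
-- pos.setdefault(ch, []).append(idx) over enumerate(word)
def wwlBuildPos (w : List Char) : PySem.Dict Char (List Int) :=
  (PySem.List.enumerate w).foldl
    (fun d p => d.modify p.2 [] (fun l => l ++ [p.1])) PySem.Dict.empty

-- the while lo < hi binary-search loop of B: first index with lst[index] > cur
def wwlBsr (lst : List Int) (cur : Int) (lo hi : Nat) : Nat :=
  if lo < hi then
    let mid := (lo + hi) / 2
    if lst.getD mid 0 ≤ cur then wwlBsr lst cur (mid + 1) hi
    else wwlBsr lst cur lo mid
  else lo
termination_by hi - lo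
decreasing_by all_goals omega

-- the 'for c in letters' loop of B's is_sub
def wwlGo (pos : PySem.Dict Char (List Int)) (cur : Int) : List Char → Bool
  | [] => true
  | c :: cs =>
    let lst := pos.getD c []
    let lo := wwlBsr lst cur 0 lst.length
    if lo = lst.length then false
    else wwlGo pos (lst.getD lo 0) cs

def words_with_letters_alt (words : List String) (letters : String) : List String :=
  words.filter (fun word => wwlGo (wwlBuildPos word.toList) (-1) letters.toList)

-- ===== PRECONDITION & SPEC =====
def Spec_words_with_letters (words : List String) (letters : String) (out : List String) : Prop := out = words_with_letters_alt words letters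
instance (words : List String) (letters : String) (out : List String) : Decidable (Spec_words_with_letters words letters out) := by unfold Spec_words_with_letters; infer_instance

-- ===== CLAIM (what is proved, stated in full; the proofs are below) =====
def Claim_equal_words_with_letters : Prop := ∀ (words : List String) (letters : String), Dom_words_with_letters words letters → Spec_words_with_letters words letters (words_with_letters words letters)

-- ===== LEMMAS AND PROOFS =====

-- reference subsequence test (proof-only)
def wwlSubq : List Char → List Char → Bool
  | [], _ => true
  | _ :: _, [] => false
  | a :: l, b :: w => if a == b then wwlSubq l w else wwlSubq (a :: l) w

-- ascending list of positions of c (proof-only)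
def wwlOcc (c : Char) : List Char → List Nat
  | [] => []
  | x :: t => if x == c then 0 :: (wwlOcc c t).map (· + 1) else (wwlOcc c t).map (· + 1)

theorem wwl_subq_nil (ls : List Char) : wwlSubq ls [] = true ↔ ls = [] := by
  cases ls <;> simp [wwlSubq]

-- A's loop computes the subsequence test
theorem wwl_loopA_eq (letters : List Char) :
    ∀ (w : List Char) (i : Nat), i ≤ letters.length →
      ((wwlLoopA letters i w = letters.length) ↔ wwlSubq (letters.drop i) w = true) := by
  intro w
  induction w with
  | nil =>
    intro i hi
    simp only [wwlLoopA, wwl_subq_nil, List.drop_eq_nil_iff]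
    omega
  | cons c rest ih =>
    intro i hi
    by_cases h : i < letters.length
    · have hd : letters.drop i = letters.get ⟨i, h⟩ :: letters.drop (i+1) :=
        List.drop_eq_getElem_cons h
      have hgd : letters.getD i ' ' = letters.get ⟨i, h⟩ := by
        simp [List.getD, List.get_eq_getElem, List.getElem?_eq_getElem h]
      by_cases he : letters.getD i ' ' == c
      · have hg : letters.get ⟨i, h⟩ = c := by
          rw [← hgd]; exact beq_iff_eq.mp he
        have hge : letters[i] = c := by simpa [List.get_eq_getElem] using hg
        rw [show wwlLoopA letters i (c :: rest) = wwlLoopA letters (i+1) rest by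
              simp [wwlLoopA, h, hge]]
        rw [ih (i+1) h, hd, hg]
        simp [wwlSubq]
      · have hg : ¬ (letters.get ⟨i, h⟩ = c) := by
          rw [← hgd]; exact fun hh => he (beq_iff_eq.mpr hh)
        have he' : (letters.getD i ' ' == c) = false := by
          cases hb : (letters.getD i ' ' == c)
          · rfl
          · exact absurd hb he
        have hge : ¬ letters[i] = c := by simpa [List.get_eq_getElem] using hg
        rw [show wwlLoopA letters i (c :: rest) = wwlLoopA letters i rest by
              simp [wwlLoopA, h, hge]]
        rw [ih i (le_of_lt h)]
        rw [hd]
        have hbeq : (letters[i] == c) = false := by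
          simpa using hge
        simp only [List.get_eq_getElem, wwlSubq, hbeq, Bool.false_eq_true, if_false]
    · have hi' : i = letters.length := by omega
      subst hi'
      simp [wwlLoopA, wwlSubq]

-- the fold over words is a filter
theorem wwl_foldA (letters : String) (ws : List String) : ∀ (acc : List String),
    List.foldl (fun ans word =>
        if wwlLoopA letters.toList 0 word.toList = letters.toList.length then ans ++ [word]
        else ans) acc ws
      = acc ++ ws.filter (fun word => wwlSubq letters.toList word.toList) := by
  induction ws with
  | nil => intro acc; simp
  | cons w t ih =>
    intro acc
    have hw := wwl_loopA_eq letters.toList w.toList 0 (Nat.zero_le _)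
    simp only [List.drop_zero] at hw
    simp only [List.foldl_cons, List.filter_cons]
    by_cases h : wwlLoopA letters.toList 0 w.toList = letters.toList.length
    · rw [if_pos h, ih, hw.mp h]; simp
    · have hb : wwlSubq letters.toList w.toList = false := by
        cases hb : wwlSubq letters.toList w.toList
        · rfl
        · exact absurd (hw.mpr hb) h
      rw [if_neg h, ih, hb]; simp

-- subq via first occurrence
theorem wwl_subq_occ (c : Char) (cs : List Char) : ∀ (s : List Char),
    wwlSubq (c :: cs) s = match wwlOcc c s with
      | [] => false
      | p :: _ => wwlSubq cs (s.drop (p + 1)) := by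
  intro s
  induction s with
  | nil => simp [wwlSubq, wwlOcc]
  | cons x t ih =>
    by_cases h : x == c
    · have hx : c = x := (beq_iff_eq.mp h).symm
      simp [wwlSubq, wwlOcc, hx]
    · have hx : ¬ (c = x) := fun hh => h (beq_iff_eq.mpr hh.symm)
      rw [show wwlSubq (c :: cs) (x :: t) = wwlSubq (c :: cs) t by simp [wwlSubq, hx]]
      rw [ih]
      simp only [wwlOcc, h]
      cases hocc : wwlOcc c t with
      | nil => simp
      | cons p ps => simp [List.drop_succ_cons]

-- occurrences of a suffix
theorem wwl_occ_drop (c : Char) : ∀ (w : List Char) (n : Nat),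
    wwlOcc c (w.drop n) = ((wwlOcc c w).filter (fun p => n ≤ p)).map (· - n) := by
  intro w
  induction w with
  | nil => intro n; simp [wwlOcc]
  | cons x t ih =>
    intro n
    cases n with
    | zero =>
      simp only [List.drop_zero]
      have h0 : ∀ l : List Nat, (l.filter (fun p => 0 ≤ p)).map (· - 0) = l := by
        intro l; simp
      rw [h0]
    | succ m =>
      have key : ∀ l : List Nat,
          (((l.map (· + 1)).filter (fun p => m + 1 ≤ p)).map (· - (m + 1)))
            = (l.filter (fun p => m ≤ p)).map (· - m) := by
        intro l
        induction l with
        | nil => simp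
        | cons a l ihl =>
          by_cases hma : m ≤ a
          · have h1 : m + 1 ≤ a + 1 := by omega
            simp only [List.map_cons, List.filter_cons, decide_eq_true_eq, h1, if_true,
              hma, List.map_cons, ihl]
            simp [Nat.succ_sub_succ]
          · have h1 : ¬ (m + 1 ≤ a + 1) := by omega
            simp only [List.map_cons, List.filter_cons, decide_eq_true_eq, h1, if_false,
              hma, ihl]
      rw [List.drop_succ_cons, ih m]
      by_cases h : x == c
      · simp only [wwlOcc, h, if_true, List.filter_cons]
        have h0 : ¬ (m + 1 ≤ 0) := by omega
        simp only [decide_eq_true_eq, h0, if_false]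
        exact (key _).symm
      · simp only [wwlOcc, h]
        exact (key _).symm

theorem wwl_occ_sorted (c : Char) (w : List Char) : (wwlOcc c w).Pairwise (· < ·) := by
  induction w with
  | nil => simp [wwlOcc]
  | cons x t ih =>
    have hm : ((wwlOcc c t).map (· + 1)).Pairwise (· < ·) := by
      refine List.Pairwise.map _ ?_ ih
      intro a b hab
      omega
    by_cases h : x == c
    · simp only [wwlOcc, h, if_true]
      refine List.Pairwise.cons ?_ hm
      intro p hp
      rcases List.mem_map.mp hp with ⟨q, _, hq⟩
      omega
    · simpa [wwlOcc, h] using hm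

-- fst-projections of the matching enumerate entries are the occurrence indices
theorem wwl_enum_occ (c : Char) : ∀ (w : List Char) (s : Int),
    ((PySem.List.enumerate w s).filter (fun p => p.2 == c)).map (fun p => p.1)
      = (wwlOcc c w).map (fun n : Nat => s + (n : Int)) := by
  intro w
  induction w with
  | nil => intro s; simp [PySem.List.enumerate_nil, wwlOcc]
  | cons x t ih =>
    intro s
    rw [PySem.List.enumerate_cons, List.filter_cons]
    by_cases h : (x == c) = true
    · simp only [h, if_pos, wwlOcc, if_true, List.map_cons]
      rw [ih (s + 1), List.map_map]
      congr 1
      · simp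
      · apply List.map_congr_left
        intro n _
        simp only [Function.comp_apply]
        push_cast
        ring
    · simp only [h, Bool.false_eq_true, if_false, wwlOcc, List.map_map]
      rw [ih (s + 1)]
      apply List.map_congr_left
      intro n _
      simp only [Function.comp_apply]
      push_cast
      ring

-- the built dict looked up at c is the occurrence list (as Ints)
theorem wwl_buildPos_getD (w : List Char) (c : Char) :
    (wwlBuildPos w).getD c [] = (wwlOcc c w).map (fun n : Nat => (n : Int)) := by
  unfold wwlBuildPos
  rw [show ((PySem.List.enumerate w).foldl
        (fun d p => d.modify p.2 [] (fun l => l ++ [p.1])) PySem.Dict.empty)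
      = (((PySem.List.enumerate w).map (fun p => (p.2, p.1))).foldl
        (fun d q => d.modify q.1 [] (fun l => l ++ [q.2])) PySem.Dict.empty)
    by rw [List.foldl_map]]
  rw [PySem.Dict.getD_foldl_modify_append]
  rw [PySem.Dict.getD_empty, List.nil_append]
  rw [List.filter_map, List.map_map]
  rw [show (((PySem.List.enumerate w).filter
        ((fun q : Char × Int => q.1 == c) ∘ (fun p : Int × Char => (p.2, p.1)))).map
        ((fun q : Char × Int => q.2) ∘ (fun p : Int × Char => (p.2, p.1))))
      = ((PySem.List.enumerate w).filter (fun p => p.2 == c)).map (fun p => p.1) from rfl]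
  rw [wwl_enum_occ c w 0]
  apply List.map_congr_left
  intro n _
  simp

-- binary-search invariant
theorem wwl_bsr_spec (lst : List Int) (cur : Int) (hs : lst.Pairwise (· ≤ ·)) :
    ∀ (lo hi : Nat), lo ≤ hi → hi ≤ lst.length →
      (∀ i, i < lo → lst.getD i 0 ≤ cur) →
      (∀ i, hi ≤ i → i < lst.length → cur < lst.getD i 0) →
      lo ≤ wwlBsr lst cur lo hi ∧ wwlBsr lst cur lo hi ≤ hi ∧
      (∀ i, i < wwlBsr lst cur lo hi → lst.getD i 0 ≤ cur) ∧
      (∀ i, wwlBsr lst cur lo hi ≤ i → i < lst.length → cur < lst.getD i 0) := by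
  have key : ∀ (n lo hi : Nat), hi - lo = n → lo ≤ hi → hi ≤ lst.length →
      (∀ i, i < lo → lst.getD i 0 ≤ cur) →
      (∀ i, hi ≤ i → i < lst.length → cur < lst.getD i 0) →
      lo ≤ wwlBsr lst cur lo hi ∧ wwlBsr lst cur lo hi ≤ hi ∧
      (∀ i, i < wwlBsr lst cur lo hi → lst.getD i 0 ≤ cur) ∧
      (∀ i, wwlBsr lst cur lo hi ≤ i → i < lst.length → cur < lst.getD i 0) := by
    intro n
    induction n using Nat.strong_induction_on with
    | _ n ih =>
      intro lo hi hn hlh hhl hlow hhigh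
      rw [wwlBsr]
      by_cases hlt : lo < hi
      · simp only [hlt, if_true]
        have hmlo : lo ≤ (lo + hi) / 2 := by omega
        have hmhi : (lo + hi) / 2 < hi := by omega
        by_cases hc : lst.getD ((lo + hi) / 2) 0 ≤ cur
        · simp only [hc, if_true]
          have hlow' : ∀ i, i < (lo + hi) / 2 + 1 → lst.getD i 0 ≤ cur := by
            intro i hi2
            by_cases hilo : i < lo
            · exact hlow i hilo
            · have hiLen : i < lst.length := by omega
              have hmLen : (lo + hi) / 2 < lst.length := by omega
              rcases Nat.lt_or_ge i ((lo + hi) / 2) with h1 | h1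
              · have hp := (List.pairwise_iff_getElem.mp hs) i ((lo + hi) / 2) hiLen hmLen h1
                rw [List.getD_eq_getElem lst 0 hiLen]
                rw [List.getD_eq_getElem lst 0 hmLen] at hc
                exact le_trans hp hc
              · have hieq : i = (lo + hi) / 2 := by omega
                rw [hieq]; exact hc
          obtain ⟨h1, h2, h3, h4⟩ :=
            ih (hi - ((lo + hi) / 2 + 1)) (by omega) ((lo + hi) / 2 + 1) hi rfl (by omega)
              hhl hlow' hhigh
          exact ⟨by omega, h2, h3, h4⟩
        · simp only [hc, if_false]
          have hhigh' : ∀ i, (lo + hi) / 2 ≤ i → i < lst.length → cur < lst.getD i 0 := by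
            intro i h1 h2
            rw [not_le] at hc
            have hmLen : (lo + hi) / 2 < lst.length := by omega
            rcases Nat.lt_or_ge ((lo + hi) / 2) i with h3 | h3
            · have hp := (List.pairwise_iff_getElem.mp hs) ((lo + hi) / 2) i hmLen h2 h3
              rw [List.getD_eq_getElem lst 0 h2]
              rw [List.getD_eq_getElem lst 0 hmLen] at hc
              exact lt_of_lt_of_le hc hp
            · have hieq : i = (lo + hi) / 2 := by omega
              rw [hieq]; exact hc
          obtain ⟨h1, h2, h3, h4⟩ :=
            ih ((lo + hi) / 2 - lo) (by omega) lo ((lo + hi) / 2) rfl (by omega) (by omega)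
              hlow hhigh'
          exact ⟨h1, by omega, h3, h4⟩
      · simp only [hlt, if_false]
        have heq : lo = hi := by omega
        exact ⟨le_refl _, hlh, hlow, fun i h1 h2 => hhigh i (heq ▸ h1) h2⟩
  intro lo hi h1 h2 h3 h4
  exact key (hi - lo) lo hi rfl h1 h2 h3 h4

-- a filter whose predicate is false on a prefix and true on the rest is a drop
theorem wwl_filter_eq_drop {α : Type} (P : α → Bool) : ∀ (l : List α) (r : Nat), r ≤ l.length →
    (∀ (i : Nat) (h : i < l.length), i < r → P l[i] = false) →
    (∀ (i : Nat) (h : i < l.length), r ≤ i → P l[i] = true) →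
    l.filter P = l.drop r := by
  intro l
  induction l with
  | nil => intro r _ _ _; simp
  | cons x t ih =>
    intro r hr h1 h2
    cases r with
    | zero =>
      rw [List.drop_zero]
      apply List.filter_eq_self.mpr
      intro a ha
      rcases List.mem_iff_getElem.mp ha with ⟨i, hlt, rfl⟩
      exact h2 i hlt (Nat.zero_le _)
    | succ k =>
      have hx : P x = false := h1 0 (by simp) (by omega)
      rw [List.drop_succ_cons, List.filter_cons, hx]
      simp only [Bool.false_eq_true, if_false]
      apply ih k (by simp at hr; omega)
      · intro i h hik
        have := h1 (i + 1) (by simp; omega) (by omega)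
        simpa using this
      · intro i h hik
        have := h2 (i + 1) (by simp; omega) (by omega)
        simpa using this

-- per-word equivalence of B's letters loop with the subsequence test
theorem wwl_go_eq (w : List Char) : ∀ (cs : List Char) (cur : Int), -1 ≤ cur →
    wwlGo (wwlBuildPos w) cur cs = wwlSubq cs (w.drop (cur + 1).toNat) := by
  intro cs
  induction cs with
  | nil => intro cur _; simp [wwlGo, wwlSubq]
  | cons c cs ih =>
    intro cur hcur
    have hl : (wwlBuildPos w).getD c [] = (wwlOcc c w).map (fun n : Nat => (n : Int)) :=
      wwl_buildPos_getD w c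
    have hlen : ((wwlOcc c w).map (fun n : Nat => (n : Int))).length = (wwlOcc c w).length := by
      simp
    have hsort : ((wwlOcc c w).map (fun n : Nat => (n : Int))).Pairwise (· ≤ ·) := by
      refine List.Pairwise.map _ ?_ (wwl_occ_sorted c w)
      intro a b hab
      exact_mod_cast Nat.le_of_lt hab
    obtain ⟨hr0, hrlen, hA, hB⟩ :=
      wwl_bsr_spec ((wwlOcc c w).map (fun n : Nat => (n : Int))) cur hsort
        0 (wwlOcc c w).length (Nat.zero_le _) (by simp)
        (by intro i h; omega) (by intro i h1 h2; omega)
    have hgetd : ∀ (i : Nat) (h : i < (wwlOcc c w).length),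
        ((wwlOcc c w).map (fun n : Nat => (n : Int))).getD i 0 = ((wwlOcc c w)[i] : Int) := by
      intro i h
      rw [List.getD_eq_getElem _ 0 (by simpa using h)]
      simp
    have hfilter : (wwlOcc c w).filter (fun p => (cur + 1).toNat ≤ p)
        = (wwlOcc c w).drop (wwlBsr ((wwlOcc c w).map (fun n : Nat => (n : Int))) cur
            0 (wwlOcc c w).length) := by
      apply wwl_filter_eq_drop _ _ _ (by omega)
      · intro i h hik
        have hle := hA i hik
        rw [hgetd i h] at hle
        simp only [decide_eq_false_iff_not]
        omega
      · intro i h hik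
        have hgt := hB i hik (by omega)
        rw [hgetd i h] at hgt
        simp only [decide_eq_true_eq]
        omega
    rw [wwl_subq_occ c cs (w.drop (cur + 1).toNat), wwl_occ_drop c w (cur + 1).toNat, hfilter]
    simp only [wwlGo, hl, List.length_map]
    by_cases hcase : wwlBsr ((wwlOcc c w).map (fun n : Nat => (n : Int))) cur
        0 (wwlOcc c w).length = (wwlOcc c w).length
    · rw [if_pos hcase, hcase]
      rw [show (wwlOcc c w).drop (wwlOcc c w).length = [] by
        apply List.drop_eq_nil_of_le; omega]
      simp
    · rw [if_neg hcase]
      have hrlt : wwlBsr ((wwlOcc c w).map (fun n : Nat => (n : Int))) cur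
          0 (wwlOcc c w).length < (wwlOcc c w).length := by omega
      rw [List.drop_eq_getElem_cons hrlt, List.map_cons]
      have hocc_r := hB _ (le_refl _) (by simpa using hrlt)
      rw [hgetd _ hrlt] at hocc_r
      have hge : (cur + 1).toNat ≤ (wwlOcc c w)[wwlBsr ((wwlOcc c w).map (fun n : Nat => (n : Int))) cur
          0 (wwlOcc c w).length] := by omega
      rw [hgetd _ hrlt, ih _ (by omega)]
      simp only [List.drop_drop]
      congr 2
      omega
-- ===== VERDICT (by name: the statement is the Claim_ definition above) =====
theorem words_with_letters_spec : Claim_equal_words_with_letters := by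
  intro words letters _
  unfold Spec_words_with_letters words_with_letters words_with_letters_alt
  rw [wwl_foldA]
  simp only [List.nil_append]
  apply List.filter_congr
  intro w _
  have h := wwl_go_eq w.toList letters.toList (-1) (by norm_num)
  norm_num at h
  rw [h]
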